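-- pv_equiv track=rewrite | github.com/miliar/Code_Jam_Webscraper | solutions_python/solutions_year11_round0_nr1/187.py | trimString
-- ===== SOURCE A (Python) =====
-- def trimString(s) :
--     l = len(s)
--     assert l>0
--     outs=[]
--     curc=''
-- #    pdb.set_trace()
--     for i in range(0,l):
--         c = s[i]
--         if c == 'A' or c == 'B' or c == 'C':
--             if not c==curc:
--                 curc=c
--                 outs.append(c)
--
--     return outs
-- ===== SOURCE B (Python) =====
-- def trimString(s):
--     assert len(s) > 0
--     t = [c for c in s if c == 'A' or c == 'B' or c == 'C']
--     return [a for a, p in zip(t, [None] + t) if a != p]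
-- ===== Notes on version B (the rewrite author's own statement) =====
-- stated objective: alternative
-- what changed: Removes the loop-carried last-emitted-character state entirely: B zips the filtered list with a shifted copy of itself ([None] + t) and keeps exactly the positions whose character differs from its predecessor, a positional pairwise comparison instead of A's stateful scan.
import Mathlib
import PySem

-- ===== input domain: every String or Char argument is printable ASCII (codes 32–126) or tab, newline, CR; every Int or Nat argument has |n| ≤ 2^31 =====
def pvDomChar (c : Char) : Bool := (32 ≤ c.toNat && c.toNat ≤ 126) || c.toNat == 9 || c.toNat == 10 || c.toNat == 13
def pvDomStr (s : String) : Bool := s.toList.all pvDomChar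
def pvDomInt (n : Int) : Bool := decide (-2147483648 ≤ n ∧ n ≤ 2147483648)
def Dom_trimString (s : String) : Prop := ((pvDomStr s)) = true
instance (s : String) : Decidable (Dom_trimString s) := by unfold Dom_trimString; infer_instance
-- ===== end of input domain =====

-- B replaces A's stateful scan (last-emitted-character variable) by zipping the filtered
-- list with a shifted copy of itself and keeping positions differing from their predecessor.

-- ===== PORT A =====
-- loop body of A: c is tested against the three accepted letters, appended if it differs from curc
def trimStringStep (st : List String × String) (c : Char) : List String × String :=
  if c = 'A' ∨ c = 'B' ∨ c = 'C' then
    if ¬ (String.ofList [c] = st.2) then (st.1 ++ [String.ofList [c]], String.ofList [c]) else st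
  else st

def trimString (s : String) : List String :=
  -- 'assert l>0' raises on the empty string: excluded by Pre_trimString
  (s.toList.foldl trimStringStep ([], "")).1

-- ===== PORT B =====
def trimString_alt (s : String) : List String :=
  -- 'assert len(s) > 0' raises on the empty string: excluded by Pre_trimString
  let t := s.toList.filter (fun c => c == 'A' || c == 'B' || c == 'C')
  ((t.zip ((none : Option Char) :: t.map some)).filter
      (fun q => some q.1 != q.2)).map (fun q => String.ofList [q.1])

-- ===== PRECONDITION & SPEC =====
-- Pre_ excludes only the empty string, on which both A and B fail their assert (AssertionError).
def Pre_trimString (s : String) : Prop := s ≠ ""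
instance (s : String) : Decidable (Pre_trimString s) := by unfold Pre_trimString; infer_instance
def pvWitness_trimString : String := "ABBA x CC"

def Spec_trimString (s : String) (out : List String) : Prop := out = trimString_alt s
instance (s : String) (out : List String) : Decidable (Spec_trimString s out) := by unfold Spec_trimString; infer_instance

-- ===== CLAIM (what is proved, stated in full; the proofs are below) =====
def Claim_equal_trimString : Prop := ∀ (s : String), Dom_trimString s → Pre_trimString s → Spec_trimString s (trimString s)

-- ===== LEMMAS AND PROOFS =====

theorem mk_singleton_ne_empty (c : Char) : String.ofList [c] ≠ "" := by
  simp

theorem mk_singleton_inj {c d : Char} (h : String.ofList [c] = String.ofList [d]) : c = d := by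
  have h2 := congrArg String.toList h
  simp at h2
  exact h2

-- A's fold ignores non-accepted characters: it equals the fold over the filtered list
theorem foldl_step_filter (l : List Char) (st : List String × String) :
    l.foldl trimStringStep st
      = (l.filter (fun c => c == 'A' || c == 'B' || c == 'C')).foldl trimStringStep st := by
  induction l generalizing st with
  | nil => rfl
  | cons c rest ih =>
    by_cases h : c = 'A' ∨ c = 'B' ∨ c = 'C'
    · have hb : (c == 'A' || c == 'B' || c == 'C') = true := by
        rcases h with h | h | h <;> simp [h]
      simp [hb, List.foldl_cons, ih]
    · have hb : (c == 'A' || c == 'B' || c == 'C') = false := by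
        simp only [Bool.or_eq_false_iff, beq_eq_false_iff_ne]
        exact ⟨⟨fun h1 => h (Or.inl h1), fun h1 => h (Or.inr (Or.inl h1))⟩, fun h1 => h (Or.inr (Or.inr h1))⟩
      simp [hb, List.foldl_cons, trimStringStep, h, ih]

-- string of A's curc variable corresponding to an optional previous character
def prevStr : Option Char → String
  | none => ""
  | some c => String.ofList [c]

-- proof-side characterisation of A's fold on an already-filtered list
def runFold (curc : String) : List Char → List Char
  | [] => []
  | c :: rest => if String.ofList [c] = curc then runFold curc rest else c :: runFold (String.ofList [c]) rest
termination_by l => l.length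

theorem foldl_step_runFold (l : List Char) (outs : List String) (curc : String)
    (habc : ∀ c ∈ l, c = 'A' ∨ c = 'B' ∨ c = 'C') :
    (l.foldl trimStringStep (outs, curc)).1 = outs ++ (runFold curc l).map (fun c => String.ofList [c]) := by
  induction l generalizing outs curc with
  | nil => simp [runFold]
  | cons c rest ih =>
    have hc := habc c (by simp)
    have hrest : ∀ d ∈ rest, d = 'A' ∨ d = 'B' ∨ d = 'C' := fun d hd => habc d (by simp [hd])
    by_cases he : String.ofList [c] = curc
    · simp [List.foldl_cons, trimStringStep, hc, he, runFold, ih _ _ hrest]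
    · simp [List.foldl_cons, trimStringStep, hc, he, runFold, ih _ _ hrest]

-- A's collapse recursion equals B's shifted-zip selection, for any previous character
theorem runFold_zip (l : List Char) (p : Option Char) :
    runFold (prevStr p) l
      = ((l.zip (p :: l.map some)).filter (fun q => some q.1 != q.2)).map Prod.fst := by
  induction l generalizing p with
  | nil => simp [runFold]
  | cons c rest ih =>
    have hz : (c :: rest).zip (p :: (c :: rest).map some)
        = (c, p) :: rest.zip ((some c) :: rest.map some) := by
      simp [List.zip_cons_cons]
    have ihc := ih (some c)
    simp only [prevStr] at ihc
    rw [hz]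
    by_cases he : some c = p
    · subst he
      simp only [runFold, prevStr, if_pos rfl, List.filter_cons]
      simpa using ihc
    · have hs : ¬ String.ofList [c] = prevStr p := by
        cases p with
        | none => exact mk_singleton_ne_empty c
        | some d => exact fun h => he (by rw [mk_singleton_inj h])
      have hb : (some c != p) = true := by simp [he]
      simp only [runFold, if_neg hs, List.filter_cons, hb]
      simp [ihc]

-- ===== VERDICT (by name: the statement is the Claim_ definition above) =====
theorem trimString_spec : Claim_equal_trimString := by
  intro s _ _
  show trimString s = trimString_alt s
  unfold trimString trimString_alt
  rw [foldl_step_filter]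
  rw [foldl_step_runFold _ [] ""]
  · have h := runFold_zip (s.toList.filter (fun c => c == 'A' || c == 'B' || c == 'C')) none
    simp only [prevStr] at h
    rw [h]
    simp [List.map_map, Function.comp]
  · intro c hc
    have := List.of_mem_filter hc
    rcases (by simpa [or_assoc] using this : c = 'A' ∨ c = 'B' ∨ c = 'C') with h | h | h <;> simp [h]
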